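-- pv_equiv track=rewrite | github.com/mannu-3935/DSA_Practice | Python/IBM_QNA/mostsoldproduct.py | featured_product
-- ===== SOURCE A (Python) =====
-- def featured_product(products):
--     freq={}
--
--     for p in products:
--         if p in freq:
--             freq[p] += 1
--         else:
--             freq[p] = 1
--
--     max_freq = max(freq.values())
--     final = []
--     for p, count in freq.items():
--         if count == max_freq:
--             final.append(p)
--     final.sort()
--     return final[-1]
-- ===== SOURCE B (Python) =====
-- def featured_product(products):
--     freq = {}
--     for p in products:
--         freq[p] = freq.get(p, 0) + 1
--     return max(freq.items(), key=lambda kv: (kv[1], kv[0]))[0]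
-- ===== Notes on version B (the rewrite author's own statement) =====
-- stated objective: simpler
-- what changed: The max-frequency pass, the tie-collecting filter loop, the sort and the final[-1] indexing are all replaced by one argmax scan over freq.items() with the composite key (count, product).
import Mathlib
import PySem

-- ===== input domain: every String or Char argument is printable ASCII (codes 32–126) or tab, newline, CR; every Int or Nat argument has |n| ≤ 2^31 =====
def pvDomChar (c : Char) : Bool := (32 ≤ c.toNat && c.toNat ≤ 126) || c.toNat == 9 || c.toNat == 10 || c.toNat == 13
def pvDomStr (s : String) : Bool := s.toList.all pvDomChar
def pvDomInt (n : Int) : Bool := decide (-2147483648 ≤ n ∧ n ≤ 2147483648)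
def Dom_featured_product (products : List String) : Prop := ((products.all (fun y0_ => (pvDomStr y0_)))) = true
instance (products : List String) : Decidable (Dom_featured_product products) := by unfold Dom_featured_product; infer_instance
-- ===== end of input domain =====

-- B replaces A's max/filter/sort/final[-1] pipeline by a single argmax scan over the
-- counter's items with the composite key (count, product); same return value on Pre_.

-- ===== PORT A =====
def featured_product (products : List String) : String :=
  let freq : PySem.Dict String Int :=
    products.foldl (fun d p =>
      if d.contains p then d.modify p 0 (· + 1) else d.insert p 1) PySem.Dict.empty
  match PySem.List.max? freq.values (fun v => v) with
  | none => ""          -- max() of an empty sequence: Python raises ValueError; excluded by Pre_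
  | some max_freq =>
    let final : List String :=
      freq.items.foldl (fun acc pc => if pc.2 = max_freq then acc ++ [pc.1] else acc) []
    let fsorted := PySem.List.sorted final (fun x => x) false
    (PySem.List.pyGet? fsorted (-1)).getD ""   -- final[-1] (never fails when freq is nonempty)

-- ===== PORT B =====
def featured_product_alt (products : List String) : String :=
  let freq : PySem.Dict String Int :=
    products.foldl (fun d p => d.insert p (d.getD p 0 + 1)) PySem.Dict.empty
  match PySem.List.max2? freq.items (fun kv => kv.2) (fun kv => kv.1) with
  | none => ""          -- max() of an empty sequence: Python raises ValueError; excluded by Pre_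
  | some kv => kv.1

-- ===== PRECONDITION & SPEC =====
-- A raises ValueError (max of an empty sequence) exactly on the empty list; B raises there too.
def Pre_featured_product (products : List String) : Prop := products ≠ []
instance (products : List String) : Decidable (Pre_featured_product products) := by
  unfold Pre_featured_product; infer_instance

def pvWitness_featured_product : List String := (["pen", "book", "pen"])

def Spec_featured_product (products : List String) (out : String) : Prop := out = featured_product_alt products
instance (products : List String) (out : String) : Decidable (Spec_featured_product products out) := by unfold Spec_featured_product; infer_instance

-- ===== CLAIM (what is proved, stated in full; the proofs are below) =====
def Claim_equal_featured_product : Prop := ∀ (products : List String), Dom_featured_product products → Pre_featured_product products → Spec_featured_product products (featured_product products)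

-- ===== LEMMAS AND PROOFS =====

-- "(y.2, y.1) ≤ (kv.2, kv.1)" in Python's lexicographic tuple order
def pvGood (y kv : String × Int) : Prop := y.2 < kv.2 ∨ (y.2 = kv.2 ∧ y.1 ≤ kv.1)

theorem pvGood_refl (a : String × Int) : pvGood a a := Or.inr ⟨rfl, le_refl _⟩

theorem pvGood_trans {u v w : String × Int} (h1 : pvGood u v) (h2 : pvGood v w) : pvGood u w := by
  rcases h1 with h1 | ⟨h1, h1'⟩ <;> rcases h2 with h2 | ⟨h2, h2'⟩
  · exact Or.inl (h1.trans h2)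
  · exact Or.inl (h2 ▸ h1)
  · exact Or.inl (h1 ▸ h2)
  · exact Or.inr ⟨h1.trans h2, h1'.trans h2'⟩

-- the step of PySem.List.max2? with k1 = snd, k2 = fst, specialised to a `some` accumulator
theorem pv_max2_fold (t : List (String × Int)) (a : String × Int) :
    ∃ kv, t.foldl
        (fun acc x =>
          match acc with
          | none => some x
          | some m =>
            if (decide (m.2 < x.2) || !decide (x.2 < m.2) && decide (m.1 < x.1)) = true
            then some x else some m)
        (some a) = some kv
      ∧ (kv = a ∨ kv ∈ t) ∧ pvGood a kv ∧ ∀ y ∈ t, pvGood y kv := by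
  induction t generalizing a with
  | nil => exact ⟨a, rfl, Or.inl rfl, pvGood_refl a, by simp⟩
  | cons x t ih =>
    simp only [List.foldl_cons]
    have hb : (decide (a.2 < x.2) || !decide (x.2 < a.2) && decide (a.1 < x.1)) = true
        ↔ (a.2 < x.2 ∨ (¬ x.2 < a.2 ∧ a.1 < x.1)) := by simp
    by_cases h : a.2 < x.2 ∨ (¬ x.2 < a.2 ∧ a.1 < x.1)
    · rw [if_pos (hb.mpr h)]
      obtain ⟨kv, hfold, hmem, hgx, hall⟩ := ih x
      have hax : pvGood a x := by
        by_cases hlt : a.2 < x.2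
        · exact Or.inl hlt
        · rcases h with h | ⟨h, h'⟩
          · exact absurd h hlt
          · exact Or.inr ⟨le_antisymm (not_lt.mp h) (not_lt.mp hlt), le_of_lt h'⟩
      refine ⟨kv, hfold, ?_, pvGood_trans hax hgx, ?_⟩
      · rcases hmem with h | h <;> simp [h]
      · intro y hy
        rcases List.mem_cons.mp hy with rfl | hy
        · exact hgx
        · exact hall y hy
    · rw [if_neg (fun hc => h (hb.mp hc))]
      obtain ⟨kv, hfold, hmem, hga, hall⟩ := ih a
      have h1 : ¬ a.2 < x.2 := fun hh => h (Or.inl hh)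
      have hxa : pvGood x a := by
        by_cases hx : x.2 < a.2
        · exact Or.inl hx
        · have h2 : ¬ a.1 < x.1 := fun hh => h (Or.inr ⟨hx, hh⟩)
          exact Or.inr ⟨le_antisymm (not_lt.mp h1) (not_lt.mp hx), not_lt.mp h2⟩
      refine ⟨kv, hfold, ?_, hga, ?_⟩
      · rcases hmem with h | h <;> simp [h]
      · intro y hy
        rcases List.mem_cons.mp hy with rfl | hy
        · exact pvGood_trans hxa hga
        · exact hall y hy

theorem pv_max2_spec (l : List (String × Int)) (hl : l ≠ []) :
    ∃ kv, PySem.List.max2? l (fun kv => kv.2) (fun kv => kv.1) = some kv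
      ∧ kv ∈ l ∧ ∀ y ∈ l, pvGood y kv := by
  cases l with
  | nil => exact absurd rfl hl
  | cons x t =>
    obtain ⟨kv, hfold, hmem, hgx, hall⟩ := pv_max2_fold t x
    refine ⟨kv, ?_, by rcases hmem with h | h <;> simp [h], fun y hy => ?_⟩
    · rw [show PySem.List.max2? (x :: t) (fun kv => kv.2) (fun kv => kv.1)
          = t.foldl
            (fun acc x =>
              match acc with
              | none => some x
              | some m =>
                if (decide (m.2 < x.2) || !decide (x.2 < m.2) && decide (m.1 < x.1)) = true
                then some x else some m)
            (some x) by
        unfold PySem.List.max2?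
        rw [List.foldl_cons]
        congr 1
        funext acc y
        cases acc with
        | none => rfl
        | some m => rfl]
      exact hfold
    · rcases List.mem_cons.mp hy with rfl | hy
      · exact hgx
      · exact hall y hy

theorem pv_pyGet_neg_one {α : Type} (xs : List α) (h : xs ≠ []) :
    PySem.List.pyGet? xs (-1) = some (xs.getLast h) := by
  have hn : 1 ≤ xs.length := List.length_pos_iff.mpr h
  simp only [PySem.List.pyGet?, PySem.List.pyIdx?]
  have h1 : ¬ ((0:Int) ≤ -1) := by norm_num
  have h2 : -(xs.length : Int) ≤ -1 := by omega
  simp only [h1, if_false, h2, if_true, Option.bind_some]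
  have : xs.length - (-(-1:Int)).toNat = xs.length - 1 := by norm_num
  rw [this, List.getElem?_eq_getElem (by omega), List.getLast_eq_getElem]

theorem pv_pairwise_le_getLast (xs : List String) (h : xs ≠ []) (hp : xs.Pairwise (· ≤ ·)) :
    ∀ y ∈ xs, y ≤ xs.getLast h := by
  induction xs with
  | nil => exact absurd rfl h
  | cons x t ih =>
    rcases List.pairwise_cons.mp hp with ⟨hx, ht⟩
    intro y hy
    cases t with
    | nil =>
      simp only [List.mem_singleton] at hy
      simp [hy, List.getLast]
    | cons z s =>
      rw [List.getLast_cons (by simp)]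
      rcases List.mem_cons.mp hy with rfl | hy
      · exact hx _ (List.getLast_mem _)
      · exact ih (by simp) ht y hy

-- A's counting loop is B's counting loop (both are Counter(products))
theorem pv_freq_eq (products : List String) :
    products.foldl (fun d p =>
        if d.contains p then d.modify p 0 (· + 1) else d.insert p 1)
        (PySem.Dict.empty : PySem.Dict String Int)
      = products.foldl (fun d p => d.insert p (d.getD p 0 + 1)) PySem.Dict.empty := by
  apply PySem.List.foldl_congr_mem
  intro d p _
  by_cases hc : d.contains p
  · simp [PySem.Dict.modify, hc]
  · simp only [hc, Bool.false_eq_true, if_false]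
    rw [PySem.Dict.getD_of_not_contains d 0 (by simpa using hc)]
    norm_num

-- the core: on a nonempty items list, A's max/filter/sort/[-1] pipeline equals B's argmax
theorem pv_core (l : List (String × Int)) (m : Int)
    (hm : PySem.List.max? (l.map Prod.snd) (fun v => v) = some m)
    (kv : String × Int)
    (hkvmem : kv ∈ l) (hkvall : ∀ y ∈ l, pvGood y kv) :
    (PySem.List.pyGet?
        (PySem.List.sorted
          (l.foldl (fun acc pc => if pc.2 = m then acc ++ [pc.1] else acc) [])
          (fun x => x) false) (-1)).getD ""
      = kv.1 := by
  have hmax : ∀ y ∈ l, y.2 ≤ m := fun y hy =>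
    PySem.List.max?_isMax hm y.2 (List.mem_map_of_mem hy)
  obtain ⟨e, hemem, he2⟩ : ∃ e ∈ l, e.2 = m := by
    obtain ⟨e, he, he2⟩ := List.mem_map.mp (PySem.List.max?_mem hm)
    exact ⟨e, he, he2⟩
  have hfinal : l.foldl (fun acc pc => if pc.2 = m then acc ++ [pc.1] else acc) []
      = (l.filter (fun pc => decide (pc.2 = m))).map Prod.fst := by
    simpa using PySem.List.foldl_append_ite (l := l) (p := fun pc => pc.2 = m)
      (f := Prod.fst) (acc := [])
  rw [hfinal]
  set final := (l.filter (fun pc => decide (pc.2 = m))).map Prod.fst with hfdef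
  have hfne : final ≠ [] := by
    simp only [hfdef, ne_eq, List.map_eq_nil_iff, List.filter_eq_nil_iff, not_forall]
    exact ⟨e, hemem, by simp [he2]⟩
  set fs := PySem.List.sorted final (fun x => x) false with hfs
  have hfsne : fs ≠ [] := fun hh => hfne ((PySem.List.sorted_eq_nil_iff _ _ _).mp hh)
  rw [pv_pyGet_neg_one fs hfsne, Option.getD_some]
  set r := fs.getLast hfsne with hr
  have hrmem : r ∈ final := (PySem.List.mem_sorted _ _ _ _).mp (List.getLast_mem hfsne)
  obtain ⟨er, hermem, her1⟩ := List.mem_map.mp hrmem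
  have her2 : er.2 = m := by simpa using (List.mem_filter.mp hermem).2
  have hermem' : er ∈ l := (List.mem_filter.mp hermem).1
  have hrmax : ∀ y ∈ l, y.2 = m → y.1 ≤ r := by
    intro y hy hy2
    have hyf : y.1 ∈ final := List.mem_map.mpr ⟨y, List.mem_filter.mpr ⟨hy, by simp [hy2]⟩, rfl⟩
    exact pv_pairwise_le_getLast fs hfsne
      (by simpa using PySem.List.sorted_pairwise (xs := final) (key := fun x => x))
      y.1 ((PySem.List.mem_sorted _ _ _ _).mpr hyf)
  have hkv2 : kv.2 = m := by
    have h1 : kv.2 ≤ m := hmax kv hkvmem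
    rcases hkvall er hermem' with h | ⟨h, _⟩
    · omega
    · omega
  have h1 : r ≤ kv.1 := by
    rcases hkvall er hermem' with h | ⟨_, h⟩
    · omega
    · exact her1 ▸ h
  have h2 : kv.1 ≤ r := hrmax kv hkvmem hkv2
  exact le_antisymm h1 h2

-- ===== VERDICT (by name: the statement is the Claim_ definition above) =====
theorem featured_product_spec : Claim_equal_featured_product := by
  intro products _ hpre
  unfold Spec_featured_product
  simp only [featured_product, featured_product_alt]
  rw [pv_freq_eq]
  set freq := products.foldl (fun d p => d.insert p (d.getD p 0 + 1))
    (PySem.Dict.empty : PySem.Dict String Int) with hfreq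
  have hine : freq.items ≠ [] := by
    rw [hfreq, PySem.Dict.foldl_insert_getD_add_one_eq_counter,
      PySem.Dict.items_counter]
    cases products with
    | nil => exact absurd rfl hpre
    | cons x t =>
      exact List.ne_nil_of_mem
        (List.mem_map_of_mem (a := x) ((PySem.Set.mem_ofList _ _).mpr (by simp)))
  obtain ⟨kv, hkv, hkvmem, hkvall⟩ := pv_max2_spec freq.items hine
  obtain ⟨m, hm⟩ : ∃ m, PySem.List.max? freq.values (fun v => v) = some m := by
    cases hmm : PySem.List.max? freq.values (fun v => v) with
    | none =>
      exact absurd ((PySem.List.max?_eq_none_iff _ _).mp hmm)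
        (by simpa [PySem.Dict.values] using hine)
    | some m => exact ⟨m, rfl⟩
  rw [hm, hkv]
  exact pv_core freq.items m hm kv hkvmem hkvall
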